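-- pv_equiv track=rewrite | github.com/axelcool1234/.dotfiles | pkgs/lean-highlighter/ansi_compress.py | compress_styles
-- ===== SOURCE A (Python) =====
-- def compress_styles(tokens):
--     """Compress consecutive style codes, simplifying 38;5;X -> X."""
--     result = []
--     i = 0
--     while i < len(tokens):
--         kind, val = tokens[i]
--
--         if kind == "style":
--             styles = [val]
--             j = i + 1
--             while j < len(tokens) and tokens[j][0] == "style":
--                 styles.append(tokens[j][1])
--                 j += 1
--
--             # Gather parameters
--             parts = []
--             for s in styles:
--                 seq_parts = s.split(";")
--                 # Special case: color like 38;5;X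
--                 if len(seq_parts) == 3 and seq_parts[0] == "38" and seq_parts[1] == "5":
--                     parts.append(seq_parts[-1])  # keep just X
--                 else:
--                     parts.extend(seq_parts)
--
--             compressed = f"\x1b[{';'.join(parts)}m"
--             result.append(("style", compressed))
--             i = j
--         else:
--             result.append((kind, val))
--             i += 1
--     return result
-- ===== SOURCE B (Python) =====
-- def _parts(val):
--     p = val.split(";")
--     return [p[2]] if len(p) == 3 and p[0] == "38" and p[1] == "5" else p
--
--
-- def compress_styles(tokens):
--     """Compress consecutive style codes, simplifying 38;5;X -> X.
--
--     Two-stage design: a single fold that merges each style token's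
--     parameter list into the previous entry when that entry is a style
--     entry (no lookahead), followed by a formatting pass that renders
--     the style entries into escape sequences.
--     """
--     merged = []  # style entries carry a list of parameter strings
--     for kind, val in tokens:
--         if kind == "style":
--             if merged and merged[-1][0] == "style":
--                 merged[-1][1].extend(_parts(val))
--             else:
--                 merged.append(("style", _parts(val)))
--         else:
--             merged.append((kind, val))
--     return [
--         ("style", "\x1b[" + ";".join(v) + "m") if k == "style" else (k, v)
--         for k, v in merged
--     ]
-- ===== Notes on version B (the rewrite author's own statement) =====
-- stated objective: alternative
-- what changed: Replaces A's nested lookahead (inner while scanning the whole style run, then a parts-building loop over the collected run) by a single no-lookahead fold that merges each style token's simplified parameter list into the previous accumulator entry, plus a separate final formatting pass that renders style entries; the intermediate data is parameter lists, not strings.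
import Mathlib
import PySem

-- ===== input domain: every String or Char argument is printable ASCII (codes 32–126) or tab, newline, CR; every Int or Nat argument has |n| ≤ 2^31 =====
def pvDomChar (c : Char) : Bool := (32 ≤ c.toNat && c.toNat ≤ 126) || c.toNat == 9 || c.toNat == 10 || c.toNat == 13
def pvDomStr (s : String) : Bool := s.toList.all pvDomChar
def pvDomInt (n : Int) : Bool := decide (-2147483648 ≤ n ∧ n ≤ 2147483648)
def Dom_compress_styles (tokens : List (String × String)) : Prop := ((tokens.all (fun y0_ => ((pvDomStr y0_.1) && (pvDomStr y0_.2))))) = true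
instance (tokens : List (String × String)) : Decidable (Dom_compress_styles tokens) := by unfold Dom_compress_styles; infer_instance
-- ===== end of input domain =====

-- B replaces A's nested lookahead run scan by a no-lookahead merge-into-previous fold over
-- parameter lists plus a separate formatting pass (objective: alternative; same asymptotic cost).

-- ===== PORT A =====
-- inner 'while j < len(tokens) and tokens[j][0] == "style"' scan: collects the vals of the
-- leading style run and returns the remaining suffix (the final j position).
def pvSpanStyles : List (String × String) → List String × List (String × String)
  | [] => ([], [])
  | (k, v) :: rest =>
    if k = "style" then
      let p := pvSpanStyles rest
      (v :: p.1, p.2)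
    else ([], (k, v) :: rest)

theorem pvSpanStyles_snd_length_le (l : List (String × String)) :
    (pvSpanStyles l).2.length ≤ l.length := by
  induction l with
  | nil => simp [pvSpanStyles]
  | cons t rest ih =>
    obtain ⟨k, v⟩ := t
    by_cases hk : k = "style" <;> simp [pvSpanStyles, hk] <;> omega

-- 'for s in styles: … parts.append/extend' loop; seq_parts[0]/[1]/[-1] are in range
-- thanks to the len == 3 guard, so getD is exact here.
def pvPartsA (styles : List String) : List String :=
  styles.foldl (fun parts s =>
    let sp := (PySem.Str.split? s ";").getD []
    if sp.length = 3 ∧ sp.getD 0 "" = "38" ∧ sp.getD 1 "" = "5" then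
      parts ++ [sp.getD (sp.length - 1) ""]
    else parts ++ sp) []

def compress_styles : List (String × String) → List (String × String)
  | [] => []
  | (k, v) :: rest =>
    if k = "style" then
      let p := pvSpanStyles rest
      ("style", "\x1b[" ++ PySem.Str.join ";" (pvPartsA (v :: p.1)) ++ "m") ::
        compress_styles p.2
    else (k, v) :: compress_styles rest
  termination_by l => l.length
  decreasing_by
  · exact Nat.lt_succ_of_le (pvSpanStyles_snd_length_le rest)
  · simp

-- ===== PORT B =====
-- _parts from Source B (p[2] is in range thanks to the len == 3 guard, so getD is exact)
def pvParts (val : String) : List String :=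
  let p := (PySem.Str.split? val ";").getD []
  if p.length = 3 ∧ p.getD 0 "" = "38" ∧ p.getD 1 "" = "5" then [p.getD 2 ""] else p

-- one iteration of Source B's merging loop; style entries carry a parameter list (Sum.inl),
-- other tokens are kept as tokens (Sum.inr); 'merged[-1][1].extend' mutates the last entry.
def pvStepB (acc : List (Sum (List String) (String × String))) (t : String × String) :
    List (Sum (List String) (String × String)) :=
  if t.1 = "style" then
    match acc.getLast? with
    | some (Sum.inl ps) => acc.dropLast ++ [Sum.inl (ps ++ pvParts t.2)]
    | _ => acc ++ [Sum.inl (pvParts t.2)]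
  else acc ++ [Sum.inr t]

-- the final formatting comprehension of Source B
def pvFmt (e : Sum (List String) (String × String)) : String × String :=
  match e with
  | Sum.inl ps => ("style", "\x1b[" ++ PySem.Str.join ";" ps ++ "m")
  | Sum.inr t => t

def compress_styles_alt (tokens : List (String × String)) : List (String × String) :=
  (tokens.foldl pvStepB []).map pvFmt

-- ===== PRECONDITION & SPEC =====
def Spec_compress_styles (tokens : List (String × String)) (out : List (String × String)) : Prop := out = compress_styles_alt tokens
instance (tokens : List (String × String)) (out : List (String × String)) : Decidable (Spec_compress_styles tokens out) := by unfold Spec_compress_styles; infer_instance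

-- ===== CLAIM (what is proved, stated in full; the proofs are below) =====
def Claim_equal_compress_styles : Prop := ∀ (tokens : List (String × String)), Dom_compress_styles tokens → Spec_compress_styles tokens (compress_styles tokens)

-- ===== LEMMAS AND PROOFS =====

theorem pvPartsA_eq (styles : List String) :
    pvPartsA styles = styles.flatMap pvParts := by
  unfold pvPartsA
  have h : (fun (parts : List String) s =>
      let sp := (PySem.Str.split? s ";").getD []
      if sp.length = 3 ∧ sp.getD 0 "" = "38" ∧ sp.getD 1 "" = "5" then
        parts ++ [sp.getD (sp.length - 1) ""]
      else parts ++ sp)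
      = fun (parts : List String) s => parts ++ pvParts s := by
    funext parts s
    unfold pvParts
    generalize (PySem.Str.split? s ";").getD [] = sp
    dsimp only
    split_ifs with hc
    · rw [hc.1]
    · rfl
  rw [h]
  simpa using PySem.List.foldl_append_eq_flatMap pvParts styles []

theorem pvSpanStyles_eq (l : List (String × String)) :
    pvSpanStyles l = ((l.takeWhile (fun u => u.1 == "style")).map Prod.snd,
                      l.dropWhile (fun u => u.1 == "style")) := by
  induction l with
  | nil => simp [pvSpanStyles]
  | cons t rest ih =>
    obtain ⟨k, v⟩ := t
    by_cases hk : k = "style" <;>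
      simp [pvSpanStyles, hk, ih]

-- B's fold consumes a run of style tokens by extending the last (style) entry's parts
theorem foldB_style_run (run : List (String × String))
    (h : ∀ u ∈ run, u.1 = "style") :
    ∀ (acc : List (Sum (List String) (String × String))) (ps : List String)
      (rest : List (String × String)),
    List.foldl pvStepB (acc ++ [Sum.inl ps]) (run ++ rest)
      = List.foldl pvStepB (acc ++ [Sum.inl (ps ++ run.flatMap (fun t => pvParts t.2))]) rest := by
  induction run with
  | nil => intro acc ps rest; simp
  | cons t run' ih =>
    intro acc ps rest
    obtain ⟨k, v⟩ := t
    have hk : k = "style" := h (k, v) (by simp)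
    have hstep : pvStepB (acc ++ [Sum.inl ps]) (k, v)
        = acc ++ [Sum.inl (ps ++ pvParts v)] := by
      simp [pvStepB, hk]
    simp only [List.cons_append, List.foldl_cons, hstep]
    rw [ih (fun u hu => h u (by simp [hu]))]
    simp [List.append_assoc]

-- head of dropWhile fails the predicate
theorem head_dropWhile_false {α : Type} (p : α → Bool) (l : List α) (x : α)
    (hx : ((l.dropWhile p).head? = some x)) : p x = false := by
  induction l with
  | nil => simp [List.dropWhile] at hx
  | cons a l ih =>
    by_cases ha : p a
    · rw [List.dropWhile_cons_of_pos ha] at hx; exact ih hx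
    · rw [List.dropWhile_cons_of_neg ha] at hx
      simp at hx
      rw [← hx]
      simpa using ha

theorem mainB : ∀ (n : ℕ) (l : List (String × String)), l.length ≤ n →
    ∀ (acc : List (Sum (List String) (String × String))),
    (∀ kv, l.head? = some kv → kv.1 = "style" →
       ∀ ps, acc.getLast? ≠ some (Sum.inl ps)) →
    (List.foldl pvStepB acc l).map pvFmt = acc.map pvFmt ++ compress_styles l := by
  intro n
  induction n with
  | zero =>
    intro l hl acc _
    have : l = [] := List.length_eq_zero_iff.mp (Nat.le_zero.mp hl)
    subst this
    simp [compress_styles]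
  | succ n ih =>
    intro l hl acc hacc
    match l with
    | [] => simp [compress_styles]
    | (k, v) :: rest =>
      by_cases hk : k = "style"
      · subst hk
        -- first step: acc's last is not a style entry, so a fresh entry is appended
        have hstep : pvStepB acc ("style", v) = acc ++ [Sum.inl (pvParts v)] := by
          unfold pvStepB
          rw [if_pos rfl]
          rcases hlast : acc.getLast? with _ | (ps | t)
          · rfl
          · exact absurd hlast (hacc _ rfl rfl ps)
          · rfl
        have hrun : ∀ u ∈ rest.takeWhile (fun u => u.1 == "style"), u.1 = "style" := by
          intro u hu
          have := List.mem_takeWhile_imp hu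
          simpa using this
        have hsplit : rest = rest.takeWhile (fun u => u.1 == "style")
            ++ rest.dropWhile (fun u => u.1 == "style") :=
          (List.takeWhile_append_dropWhile).symm
        have hdroplen : (rest.dropWhile (fun u => u.1 == "style")).length ≤ n := by
          have := List.length_dropWhile_le (fun (u : String × String) => u.1 == "style") rest
          simp at hl; omega
        have hdrophead : ∀ kv, (rest.dropWhile (fun u => u.1 == "style")).head? = some kv →
            kv.1 = "style" → ∀ ps,
            (acc ++ [Sum.inl (pvParts v ++ (rest.takeWhile (fun (u : String × String) => u.1 == "style")).flatMap
              (fun (t : String × String) => pvParts t.2))]).getLast? ≠ some (Sum.inl ps) := by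
          intro kv hkv hkvs ps _
          have := head_dropWhile_false _ rest kv hkv
          rw [hkvs] at this
          simp at this
        calc (List.foldl pvStepB acc (("style", v) :: rest)).map pvFmt
            = (List.foldl pvStepB (acc ++ [Sum.inl (pvParts v)]) rest).map pvFmt := by
              rw [List.foldl_cons, hstep]
          _ = (List.foldl pvStepB (acc ++ [Sum.inl (pvParts v
                ++ (rest.takeWhile (fun u => u.1 == "style")).flatMap (fun t => pvParts t.2))])
                (rest.dropWhile (fun u => u.1 == "style"))).map pvFmt := by
              conv_lhs => rw [hsplit]
              rw [foldB_style_run _ hrun]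
          _ = acc.map pvFmt ++ compress_styles (("style", v) :: rest) := by
              rw [ih _ hdroplen _ hdrophead]
              simp only [compress_styles, pvSpanStyles_eq, pvPartsA_eq]
              simp [pvFmt, List.flatMap_cons, List.flatMap_map]
      · have hstep : pvStepB acc (k, v) = acc ++ [Sum.inr (k, v)] := by
          simp [pvStepB, hk]
        have hlen : rest.length ≤ n := by simp at hl; omega
        have hhead : ∀ kv, rest.head? = some kv → kv.1 = "style" →
            ∀ ps, (acc ++ [Sum.inr (k, v)]).getLast? ≠ some (Sum.inl ps) := by
          intro kv _ _ ps h
          simp at h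
        rw [List.foldl_cons, hstep, ih _ hlen _ hhead]
        simp [compress_styles, hk, pvFmt]

-- ===== VERDICT (by name: the statement is the Claim_ definition above) =====
theorem compress_styles_spec : Claim_equal_compress_styles := by
  intro tokens _
  unfold Spec_compress_styles compress_styles_alt
  have := mainB tokens.length tokens le_rfl []
    (by intro kv _ _ ps h; simp at h)
  simpa using this.symm
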